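-- pv_equiv track=rewrite | github.com/owmm-vlm-project/OWMM-VLM | dataset_generate/habitat-lab/habitat-mas/habitat_mas/perception/mesh_utils.py | compute_triangle_adjacency
-- ===== SOURCE A (Python) =====
-- def compute_triangle_adjacency(triangles):
--     """
--     Computes the adjacency list for triangles in a mesh based on shared edges.
--
--     :param triangles: A list of triangles, where each triangle is represented by a tuple or list of vertex indices.
--     :return: A list of lists, where each list contains the indices of neighboring triangles for each triangle.
--     """
--     # TODO: Improve the algorithm for better performance
--     adjacency_list = []
--     for i, triangle in enumerate(triangles):
--         triangle_neighbors = []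
--         for j, other_triangle in enumerate(triangles):
--             if i != j:
--                 shared_vertices = set(triangle).intersection(other_triangle)
--                 if len(shared_vertices) == 2:
--                     triangle_neighbors.append(j)
--
--         adjacency_list.append(triangle_neighbors)
--     return adjacency_list
-- ===== SOURCE B (Python) =====
-- def compute_triangle_adjacency(triangles):
--     # Index: vertex -> list of triangle indices containing it (ascending).
--     vert_map = {}
--     for j, tri in enumerate(triangles):
--         for v in set(tri):
--             vert_map.setdefault(v, []).append(j)
--     adjacency_list = []
--     for i, tri in enumerate(triangles):
--         cnt = {}
--         for v in set(tri):
--             for j in vert_map[v]: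
--                 cnt[j] = cnt.get(j, 0) + 1
--         adjacency_list.append(sorted(j for j, c in cnt.items() if c == 2 and j != i))
--     return adjacency_list
-- ===== Notes on version B (the rewrite author's own statement) =====
-- stated objective: faster
-- what changed: Replaced the all-pairs set-intersection scan with a vertex-to-triangle inverted index: each triangle's shared-vertex counts are accumulated only over triangles that actually share a vertex, then each neighbor list is sorted.
import Mathlib
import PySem

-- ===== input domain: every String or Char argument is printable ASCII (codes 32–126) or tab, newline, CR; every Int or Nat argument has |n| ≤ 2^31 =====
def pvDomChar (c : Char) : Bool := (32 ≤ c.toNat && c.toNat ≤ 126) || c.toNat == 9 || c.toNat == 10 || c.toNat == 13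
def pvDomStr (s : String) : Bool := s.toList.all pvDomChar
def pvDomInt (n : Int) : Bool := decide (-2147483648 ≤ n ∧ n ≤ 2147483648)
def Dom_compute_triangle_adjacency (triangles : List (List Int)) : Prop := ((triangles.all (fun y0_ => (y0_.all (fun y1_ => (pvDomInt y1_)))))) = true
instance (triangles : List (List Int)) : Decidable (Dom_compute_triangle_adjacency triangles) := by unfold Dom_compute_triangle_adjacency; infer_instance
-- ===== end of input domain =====

-- B replaces A's all-pairs set-intersection scan by a vertex→triangle inverted index with
-- per-triangle shared-vertex counters (objective: faster, asymptotically on sparse meshes).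

-- ===== PORT A =====
-- Python A: for each triangle, scan ALL other triangles and append j when
-- len(set(triangle).intersection(other_triangle)) == 2.
def compute_triangle_adjacency (triangles : List (List Int)) : List (List Int) :=
  (PySem.List.enumerate triangles).foldl (fun adjacency_list p =>
    let triangle_neighbors :=
      (PySem.List.enumerate triangles).foldl (fun tn q =>
        if p.1 ≠ q.1 then
          if PySem.Set.len (PySem.Set.inter (PySem.Set.ofList p.2) q.2) = 2 then
            tn ++ [q.1]
          else tn
        else tn) []
    adjacency_list ++ [triangle_neighbors]) []

-- ===== PORT B =====
-- Python B: build vert_map : vertex → ascending list of triangle indices containing it; for each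
-- triangle count, per other triangle, the distinct shared vertices, keep counts = 2, sort.
-- (Source B iterates Python sets only where the result is order-independent; the port iterates
-- PySem.Set's first-insertion order.)
def compute_triangle_adjacency_alt (triangles : List (List Int)) : List (List Int) :=
  let vert_map : PySem.Dict Int (List Int) :=
    (PySem.List.enumerate triangles).foldl (fun vm p =>
      (PySem.Set.ofList p.2).foldl (fun vm v => vm.modify v [] (· ++ [p.1])) vm)
      PySem.Dict.empty
  (PySem.List.enumerate triangles).foldl (fun adjacency_list p =>
    let cnt : PySem.Dict Int Int :=
      (PySem.Set.ofList p.2).foldl (fun c v =>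
        (vert_map.getD v []).foldl (fun c j => c.insert j (c.getD j 0 + 1)) c)
        PySem.Dict.empty
    adjacency_list ++
      [PySem.List.sorted ((cnt.items.filter (fun q => q.2 == 2 && q.1 != p.1)).map (·.1))
        (fun x => x) false]) []

-- ===== PRECONDITION & SPEC =====
def Spec_compute_triangle_adjacency (triangles : List (List Int)) (out : List (List Int)) : Prop := out = compute_triangle_adjacency_alt triangles
instance (triangles : List (List Int)) (out : List (List Int)) : Decidable (Spec_compute_triangle_adjacency triangles out) := by unfold Spec_compute_triangle_adjacency; infer_instance

-- ===== CLAIM (what is proved, stated in full; the proofs are below) =====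
def Claim_equal_compute_triangle_adjacency : Prop := ∀ (triangles : List (List Int)), Dom_compute_triangle_adjacency triangles → Spec_compute_triangle_adjacency triangles (compute_triangle_adjacency triangles)

-- ===== LEMMAS AND PROOFS =====

theorem innerVM (s : List Int) (hs : s.Nodup) (vm : PySem.Dict Int (List Int)) (j v : Int) :
    (s.foldl (fun vm u => vm.modify u [] (· ++ [j])) vm).getD v []
      = vm.getD v [] ++ (if v ∈ s then [j] else []) := by
  have h1 : s.foldl (fun vm u => vm.modify u [] (· ++ [j])) vm
      = (s.map (fun u => (u, j))).foldl (fun d p => d.modify p.1 [] (· ++ [p.2])) vm := by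
    rw [List.foldl_map]
  rw [h1, PySem.Dict.getD_foldl_modify_append]
  congr 1
  rw [List.filter_map]
  have h2 : ((fun (p : Int × Int) => p.1 == v) ∘ fun u => (u, j)) = (· == v) := rfl
  rw [h2, List.filter_beq]
  by_cases hv : v ∈ s
  · rw [List.count_eq_one_of_mem hs hv]; simp [hv]
  · rw [List.count_eq_zero_of_not_mem hv]; simp [hv]

theorem vmBuild (L : List (Int × List Int)) (d : PySem.Dict Int (List Int)) (v : Int) :
    (L.foldl (fun vm q => (PySem.Set.ofList q.2).foldl (fun vm u => vm.modify u [] (· ++ [q.1])) vm) d).getD v []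
      = d.getD v [] ++ (L.filter (fun q => decide (v ∈ PySem.Set.ofList q.2))).map (·.1) := by
  induction L generalizing d with
  | nil => simp
  | cons q L ih =>
    simp only [List.foldl_cons, List.filter_cons]
    rw [ih, innerVM _ (PySem.Set.nodup_ofList _)]
    by_cases hv : v ∈ PySem.Set.ofList q.2 <;> simp [hv]

theorem cntCount (g : Int → List Int) (vs : List Int) (d : PySem.Dict Int Int) (j : Int) :
    (vs.foldl (fun c v => (g v).foldl (fun c j => c.insert j (c.getD j 0 + 1)) c) d).getD j 0
      = d.getD j 0 + ((vs.flatMap g).count j : Int) := by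
  induction vs generalizing d with
  | nil => simp
  | cons v vs ih =>
    simp only [List.foldl_cons, List.flatMap_cons, List.count_append]
    rw [ih, PySem.Dict.getD_foldl_insert_add_one]
    push_cast; ring

theorem cntKeys (g : Int → List Int) (vs : List Int) (d : PySem.Dict Int Int) :
    (vs.foldl (fun c v => (g v).foldl (fun c j => c.insert j (c.getD j 0 + 1)) c) d).keys
      = PySem.Set.update d.keys (vs.flatMap g) := by
  induction vs generalizing d with
  | nil => simp [PySem.Set.update]
  | cons v vs ih =>
    simp only [List.foldl_cons, List.flatMap_cons]
    rw [ih, PySem.Dict.keys_foldl_insert, PySem.Set.update_append]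

def vmB (t : List (List Int)) : PySem.Dict Int (List Int) :=
  (PySem.List.enumerate t).foldl (fun vm p =>
    (PySem.Set.ofList p.2).foldl (fun vm v => vm.modify v [] (· ++ [p.1])) vm)
    PySem.Dict.empty

def occL (t : List (List Int)) (v : Int) : List Int :=
  ((PySem.List.enumerate t).filter (fun q => decide (v ∈ PySem.Set.ofList q.2))).map (·.1)

theorem vmB_getD (t : List (List Int)) (v : Int) : (vmB t).getD v [] = occL t v := by
  rw [vmB, vmBuild]; simp [occL]

theorem en_fst_nodup (t : List (List Int)) : (((PySem.List.enumerate t).map (·.1)).Nodup) := by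
  have h := PySem.List.pairwise_lt_enumerate t (0 : Int)
  exact (List.pairwise_map.mpr h).imp (fun hlt => ne_of_lt hlt)

theorem occL_nodup (t : List (List Int)) (v : Int) : (occL t v).Nodup := by
  have hsub : List.Sublist (occL t v) ((PySem.List.enumerate t).map (·.1)) :=
    List.Sublist.map _ List.filter_sublist
  exact (en_fst_nodup t).sublist hsub

theorem mem_occL (t : List (List Int)) (v j : Int) :
    j ∈ occL t v ↔ ∃ q ∈ PySem.List.enumerate t, q.1 = j ∧ v ∈ PySem.Set.ofList q.2 := by
  simp only [occL, List.mem_map, List.mem_filter, decide_eq_true_eq]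
  constructor
  · rintro ⟨q, ⟨hm, hv⟩, rfl⟩; exact ⟨q, hm, rfl, hv⟩
  · rintro ⟨q, hm, rfl, hv⟩; exact ⟨q, ⟨hm, hv⟩, rfl⟩

theorem mem_occL_of_en (t : List (List Int)) (q : Int × List Int)
    (hq : q ∈ PySem.List.enumerate t) (v : Int) :
    q.1 ∈ occL t v ↔ v ∈ q.2 := by
  rw [mem_occL]
  constructor
  · rintro ⟨q', hq', hfst, hv⟩
    have : q' = q := List.inj_on_of_nodup_map (en_fst_nodup t) hq' hq hfst
    subst this
    exact (PySem.Set.mem_ofList _ _).mp hv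
  · intro hv
    exact ⟨q, hq, rfl, (PySem.Set.mem_ofList _ _).mpr hv⟩

theorem count_flat (t : List (List Int)) (vs : List Int) (j : Int) :
    ((vs.flatMap (occL t)).count j) = vs.countP (fun v => decide (j ∈ occL t v)) := by
  induction vs with
  | nil => simp
  | cons v vs ih =>
    simp only [List.flatMap_cons, List.count_append, List.countP_cons, ih]
    by_cases hv : j ∈ occL t v
    · rw [List.count_eq_one_of_mem (occL_nodup t v) hv]; simp [hv]; omega
    · rw [List.count_eq_zero_of_not_mem hv]; simp [hv]

theorem interLen_eq (t : List (List Int)) (s : List Int) (q : Int × List Int)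
    (hq : q ∈ PySem.List.enumerate t) :
    PySem.Set.len (PySem.Set.inter (PySem.Set.ofList s) q.2)
      = (((PySem.Set.ofList s).countP (fun v => decide (q.1 ∈ occL t v)) : Nat) : Int) := by
  have h1 : (PySem.Set.ofList s).countP (fun v => decide (q.1 ∈ occL t v))
      = (PySem.Set.ofList s).countP (fun v => q.2.contains v) := by
    apply List.countP_congr
    intro v _
    simp [mem_occL_of_en t q hq v]
  rw [h1, PySem.Set.len, PySem.Set.inter, ← List.countP_eq_length_filter]
  rfl

def cntD (t : List (List Int)) (s : List Int) : PySem.Dict Int Int :=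
  (PySem.Set.ofList s).foldl (fun c v =>
    ((vmB t).getD v []).foldl (fun c j => c.insert j (c.getD j 0 + 1)) c)
    PySem.Dict.empty

theorem cntD_getD (t : List (List Int)) (s : List Int) (j : Int) :
    (cntD t s).getD j 0 = ((((PySem.Set.ofList s).flatMap (occL t)).count j : Nat) : Int) := by
  rw [cntD]
  simp only [vmB_getD]
  rw [cntCount]
  simp

theorem cntD_keys (t : List (List Int)) (s : List Int) :
    (cntD t s).keys = PySem.Set.ofList ((PySem.Set.ofList s).flatMap (occL t)) := by
  rw [cntD]
  simp only [vmB_getD]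
  rw [cntKeys]
  simp [PySem.Set.update_nil_left]

theorem en_filter_fst_nodup (t : List (List Int)) (f : Int × List Int → Bool) :
    ((((PySem.List.enumerate t).filter f).map (·.1)).Nodup) := by
  exact (en_fst_nodup t).sublist (List.Sublist.map _ List.filter_sublist)

theorem row_eq (t : List (List Int)) (p : Int × List Int) :
    PySem.List.sorted (((cntD t p.2).items.filter (fun q => q.2 == 2 && q.1 != p.1)).map (·.1))
        (fun x => x) false
      = ((PySem.List.enumerate t).filter (fun q =>
          decide (p.1 ≠ q.1 ∧ PySem.Set.len (PySem.Set.inter (PySem.Set.ofList p.2) q.2) = 2))).map (·.1) := by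
  have hkeysnd : (cntD t p.2).keys.Nodup := by
    rw [cntD_keys]; exact PySem.Set.nodup_ofList _
  -- S = filtered keys
  have hS : ((cntD t p.2).items.filter (fun q => q.2 == 2 && q.1 != p.1)).map (·.1)
      = (cntD t p.2).keys.filter (fun k => (cntD t p.2).getD k 0 == 2 && k != p.1) := by
    rw [PySem.Dict.items_eq_map_keys _ hkeysnd 0, List.filter_map, List.map_map]
    simp [Function.comp_def]
  rw [hS]
  set S := (cntD t p.2).keys.filter (fun k => (cntD t p.2).getD k 0 == 2 && k != p.1) with hSdef
  set T := ((PySem.List.enumerate t).filter (fun q =>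
      decide (p.1 ≠ q.1 ∧ PySem.Set.len (PySem.Set.inter (PySem.Set.ofList p.2) q.2) = 2))).map (·.1) with hTdef
  have hSnd : S.Nodup := hkeysnd.filter _
  have hTnd : T.Nodup := en_filter_fst_nodup t _
  -- membership characterisations
  have hmemS : ∀ j : Int, j ∈ S ↔
      (((PySem.Set.ofList p.2).flatMap (occL t)).count j = 2 ∧ j ≠ p.1) := by
    intro j
    rw [hSdef, List.mem_filter, cntD_keys]
    constructor
    · rintro ⟨hk, hc⟩
      simp only [Bool.and_eq_true, beq_iff_eq, bne_iff_ne] at hc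
      rw [cntD_getD] at hc
      exact ⟨by exact_mod_cast hc.1, hc.2⟩
    · rintro ⟨hc, hne⟩
      have hm : j ∈ (PySem.Set.ofList p.2).flatMap (occL t) := by
        rw [← List.count_pos_iff, hc]; omega
      refine ⟨(PySem.Set.mem_ofList _ _).mpr hm, ?_⟩
      simp only [Bool.and_eq_true, beq_iff_eq, bne_iff_ne]
      rw [cntD_getD, hc]
      exact ⟨rfl, hne⟩
  have hmemT : ∀ j : Int, j ∈ T ↔
      (((PySem.Set.ofList p.2).flatMap (occL t)).count j = 2 ∧ j ≠ p.1) := by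
    intro j
    rw [hTdef]
    simp only [List.mem_map, List.mem_filter, decide_eq_true_eq]
    constructor
    · rintro ⟨q, ⟨hq, hne, hlen⟩, rfl⟩
      rw [interLen_eq t p.2 q hq] at hlen
      rw [count_flat]
      constructor
      · have : (PySem.Set.ofList p.2).countP (fun v => decide (q.1 ∈ occL t v)) = 2 := by
          exact_mod_cast hlen
        exact this
      · exact fun h => hne h.symm
    · rintro ⟨hc, hne⟩
      rw [count_flat] at hc
      -- find a witness q with q.1 = j
      have hm : j ∈ (PySem.Set.ofList p.2).flatMap (occL t) := by
        rw [← List.count_pos_iff, count_flat, hc]; omega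
      rw [List.mem_flatMap] at hm
      obtain ⟨v, _, hv⟩ := hm
      rw [mem_occL] at hv
      obtain ⟨q, hq, hfst, _⟩ := hv
      refine ⟨q, ⟨hq, ?_, ?_⟩, hfst⟩
      · rw [hfst]; exact fun h => hne h.symm
      · rw [interLen_eq t p.2 q hq, hfst, hc]; rfl
    
  have hperm : (PySem.List.sorted S (fun x => x) false).Perm T := by
    refine (PySem.List.sorted_perm S (fun x => x) false).trans ?_
    rw [List.perm_ext_iff_of_nodup hSnd hTnd]
    intro a; rw [hmemS, hmemT]
  have hTpair : T.Pairwise (fun a b => a ≤ b) := by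
    rw [hTdef, List.pairwise_map]
    exact (((PySem.List.pairwise_lt_enumerate t 0).filter _).imp (fun h => le_of_lt h))
  exact PySem.List.eq_of_perm_of_pairwise_le_of_injective (fun x => x) (fun a b h => h)
    hperm (PySem.List.sorted_pairwise S (fun x => x)) hTpair

-- ===== VERDICT (by name: the statement is the Claim_ definition above) =====
theorem compute_triangle_adjacency_spec : Claim_equal_compute_triangle_adjacency := by
  intro t _
  unfold Spec_compute_triangle_adjacency compute_triangle_adjacency compute_triangle_adjacency_alt
  rw [PySem.List.foldl_append_singleton_eq_map, PySem.List.foldl_append_singleton_eq_map]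
  simp only [List.nil_append]
  apply List.map_congr_left
  intro p hp
  -- A's inner loop: collapse the nested ifs and turn the append-loop into filter+map
  have hbody : ∀ (tn : List Int) (q : Int × List Int), q ∈ PySem.List.enumerate t →
      (if p.1 ≠ q.1 then
        if PySem.Set.len (PySem.Set.inter (PySem.Set.ofList p.2) q.2) = 2 then tn ++ [q.1] else tn
       else tn)
      = (if (p.1 ≠ q.1 ∧ PySem.Set.len (PySem.Set.inter (PySem.Set.ofList p.2) q.2) = 2)
         then tn ++ [q.1] else tn) := by
    intro tn q _
    split_ifs with h1 h2 h3 <;> first | rfl | (exfalso; tauto)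
  rw [PySem.List.foldl_congr_mem _ _ _ _ hbody]
  have hA := PySem.List.foldl_append_ite
      (p := fun q : Int × List Int => p.1 ≠ q.1 ∧ PySem.Set.len (PySem.Set.inter (PySem.Set.ofList p.2) q.2) = 2)
      (f := fun q : Int × List Int => q.1) (l := PySem.List.enumerate t) (acc := ([] : List Int))
  rw [hA]
  simp only [List.nil_append]
  -- B's row is exactly row_eq's left-hand side (vmB/cntD are definitionally the inline folds)
  exact (row_eq t p).symm
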